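-- pv_equiv track=rewrite | github.com/ldct/cp | usaco/2022/2022_jan/bronze/B/B.py | gt
-- ===== SOURCE A (Python) =====
-- def gt(A, B):
--     a_win = 0
--     b_win = 0
--
--     for a in A:
--         for b in B:
--             if a > b:
--                 a_win += 1
--             if a < b:
--                 b_win += 1
--
--     return a_win > b_win
-- ===== SOURCE B (Python) =====
-- def gt(A, B):
--     # Sort B once, then for each a count wins/losses by binary search.
--     sb = sorted(B)
--     m = len(sb)
--     diff = 0
--     for a in A:
--         # bisect_left(sb, a): number of b < a
--         lo, hi = 0, m
--         while lo < hi: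
--             mid = (lo + hi) // 2
--             if sb[mid] < a:
--                 lo = mid + 1
--             else:
--                 hi = mid
--         lt = lo
--         # bisect_right(sb, a): number of b <= a
--         lo, hi = 0, m
--         while lo < hi:
--             mid = (lo + hi) // 2
--             if a < sb[mid]:
--                 hi = mid
--             else:
--                 lo = mid + 1
--         diff += lt - (m - lo)
--     return diff > 0
-- ===== Notes on version B (the rewrite author's own statement) =====
-- stated objective: faster
-- what changed: Replaced the nested scan over all (a,b) pairs by sorting B once and, for each a, counting b<a and b<=a with binary searches, accumulating the single win-count difference.
import Mathlib
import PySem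

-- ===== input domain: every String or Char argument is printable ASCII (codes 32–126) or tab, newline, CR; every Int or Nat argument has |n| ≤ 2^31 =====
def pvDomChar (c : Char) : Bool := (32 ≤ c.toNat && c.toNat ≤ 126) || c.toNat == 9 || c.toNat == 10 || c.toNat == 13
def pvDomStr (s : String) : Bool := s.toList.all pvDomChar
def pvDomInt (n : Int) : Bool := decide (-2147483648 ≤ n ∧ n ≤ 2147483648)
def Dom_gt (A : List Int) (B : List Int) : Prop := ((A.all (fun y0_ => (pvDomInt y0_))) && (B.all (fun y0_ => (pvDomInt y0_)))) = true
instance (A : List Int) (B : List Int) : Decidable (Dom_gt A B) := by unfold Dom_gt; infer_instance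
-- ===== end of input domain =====

-- B sorts B once and counts per-element wins/losses by binary search instead of A's nested pair scan (faster).

-- ===== PORT A =====
def gt (A : List Int) (B : List Int) : Bool :=
  let s := A.foldl (fun s a =>
    B.foldl (fun s b =>
      (if a > b then s.1 + 1 else s.1, if a < b then s.2 + 1 else s.2)) s) ((0 : Int), (0 : Int))
  decide (s.1 > s.2)

-- ===== PORT B =====
-- the two hand-written while-loops in Source B are CPython's bisect_left / bisect_right loops verbatim,
-- which is exactly what PySem.List.bisectLeft / bisectRight are defined as.
def gt_alt (A : List Int) (B : List Int) : Bool :=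
  let sb := PySem.List.sorted B (fun x => x) false
  let m := sb.length
  let diff := A.foldl (fun d a =>
    d + (((PySem.List.bisectLeft sb a : Int))
         - ((m : Int) - (PySem.List.bisectRight sb a : Int)))) (0 : Int)
  decide (diff > 0)

-- ===== PRECONDITION & SPEC =====
def Spec_gt (A : List Int) (B : List Int) (out : Bool) : Prop := out = gt_alt A B
instance (A : List Int) (B : List Int) (out : Bool) : Decidable (Spec_gt A B out) := by unfold Spec_gt; infer_instance

-- ===== CLAIM (what is proved, stated in full; the proofs are below) =====
def Claim_equal_gt : Prop := ∀ (A : List Int) (B : List Int), Dom_gt A B → Spec_gt A B (gt A B)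

-- ===== LEMMAS AND PROOFS =====

-- counting by a prefix/suffix split of indices
theorem countP_eq_of_prefix (l : List Int) (p : Int → Bool) (n : Nat) (hn : n ≤ l.length)
    (h1 : ∀ (j : Nat) (hj : j < l.length), j < n → p l[j])
    (h2 : ∀ (j : Nat) (hj : j < l.length), n ≤ j → ¬ p l[j]) :
    l.countP p = n := by
  induction l generalizing n with
  | nil => simp_all
  | cons a t ih =>
    cases n with
    | zero =>
      simp only [List.countP_cons]
      have hz : t.countP p = 0 := by
        rw [List.countP_eq_zero]
        intro x hx
        obtain ⟨j, hj, rfl⟩ := List.mem_iff_getElem.mp hx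
        have := h2 (j + 1) (by simpa using Nat.succ_lt_succ hj) (Nat.zero_le _)
        simpa using this
      have ha : ¬ p a := by simpa using h2 0 (by simp) (Nat.le_refl 0)
      simp [hz, ha]
    | succ m =>
      have ha : p a := by simpa using h1 0 (by simp) (Nat.succ_pos m)
      have ht : t.countP p = m := by
        apply ih m (by simpa using Nat.lt_succ_iff.mp hn)
        · intro j hj hjm
          have := h1 (j + 1) (by simpa using Nat.succ_lt_succ hj) (by omega)
          simpa using this
        · intro j hj hjm
          have := h2 (j + 1) (by simpa using Nat.succ_lt_succ hj) (by omega)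
          simpa using this
      simp [ha, ht]

theorem countP_eq_of_suffix (l : List Int) (p : Int → Bool) (n : Nat) (hn : n ≤ l.length)
    (h1 : ∀ (j : Nat) (hj : j < l.length), j < n → ¬ p l[j])
    (h2 : ∀ (j : Nat) (hj : j < l.length), n ≤ j → p l[j]) :
    l.countP p = l.length - n := by
  have h := countP_eq_of_prefix l (fun x => ¬ p x) n hn
    (by intro j hj hjn; simpa using h1 j hj hjn)
    (by intro j hj hjn; simpa using h2 j hj hjn)
  have := List.length_eq_countP_add_countP (l := l) (p := p)
  omega

-- bisect results on sorted B name the pairwise win counts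
theorem bisectLeft_eq_countP (B : List Int) (a : Int) :
    (PySem.List.bisectLeft (PySem.List.sorted B (fun x => x) false) a : Int)
      = (B.countP (fun b => decide (b < a)) : Int) := by
  set sb := PySem.List.sorted B (fun x => x) false with hsb
  have hsort : List.Pairwise (fun x1 x2 => x1 ≤ x2) sb := PySem.List.sorted_pairwise B (fun x => x)
  obtain ⟨hle, hlt, hge⟩ := PySem.List.bisectLeft_spec sb a hsort
  have hc : sb.countP (fun b => decide (b < a)) = PySem.List.bisectLeft sb a := by
    apply countP_eq_of_prefix sb _ _ hle
    · intro j hj hjn; simpa using hlt j hj hjn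
    · intro j hj hjn; simpa using not_lt.mpr (hge j hj hjn)
  have hperm : sb.Perm B := PySem.List.sorted_perm B (fun x => x) false
  rw [← hperm.countP_eq, hc]

theorem bisectRight_eq_countP (B : List Int) (a : Int) :
    ((PySem.List.sorted B (fun x => x) false).length : Int)
      - (PySem.List.bisectRight (PySem.List.sorted B (fun x => x) false) a : Int)
      = (B.countP (fun b => decide (a < b)) : Int) := by
  set sb := PySem.List.sorted B (fun x => x) false with hsb
  have hsort : List.Pairwise (fun x1 x2 => x1 ≤ x2) sb := PySem.List.sorted_pairwise B (fun x => x)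
  obtain ⟨hle, hlt, hge⟩ := PySem.List.bisectRight_spec sb a hsort
  have hc : sb.countP (fun b => decide (a < b)) = sb.length - PySem.List.bisectRight sb a := by
    apply countP_eq_of_suffix sb _ _ hle
    · intro j hj hjn; simpa using not_lt.mpr (hlt j hj hjn)
    · intro j hj hjn; simpa using hge j hj hjn
  have hperm : sb.Perm B := PySem.List.sorted_perm B (fun x => x) false
  rw [← hperm.countP_eq, hc]
  omega

-- A's inner loop over B counts (b < a) and (a < b)
theorem gt_inner (B : List Int) (a : Int) (x y : Int) :
    B.foldl (fun s b =>
      (if a > b then s.1 + 1 else s.1, if a < b then s.2 + 1 else s.2)) (x, y)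
      = (x + (B.countP (fun b => decide (b < a)) : Int),
         y + (B.countP (fun b => decide (a < b)) : Int)) := by
  induction B generalizing x y with
  | nil => simp
  | cons b t ih =>
    simp only [List.foldl_cons, List.countP_cons, ih]
    by_cases h1 : a > b <;> by_cases h2 : a < b <;>
      simp [h1, h2, Prod.ext_iff] <;> omega

-- A's outer loop accumulates the two sums
theorem gt_outer (A : List Int) (B : List Int) (x y : Int) :
    A.foldl (fun s a =>
      B.foldl (fun s b =>
        (if a > b then s.1 + 1 else s.1, if a < b then s.2 + 1 else s.2)) s) (x, y)
      = (x + (A.map (fun a => (B.countP (fun b => decide (b < a)) : Int))).sum,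
         y + (A.map (fun a => (B.countP (fun b => decide (a < b)) : Int))).sum) := by
  induction A generalizing x y with
  | nil => simp
  | cons a t ih =>
    simp only [List.foldl_cons, gt_inner, ih, List.map_cons, List.sum_cons, Prod.mk.injEq]
    constructor <;> ring

-- B's loop accumulates the difference of the same two sums
theorem gt_alt_fold (A : List Int) (f : Int → Int) (d : Int) :
    A.foldl (fun d a => d + f a) d = d + (A.map f).sum := by
  induction A generalizing d with
  | nil => simp
  | cons a t ih => simp only [List.foldl_cons, List.map_cons, List.sum_cons, ih]; ring

theorem sum_map_sub (A : List Int) (f g : Int → Int) :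
    (A.map (fun a => f a - g a)).sum = (A.map f).sum - (A.map g).sum := by
  induction A with
  | nil => simp
  | cons a t ih => simp only [List.map_cons, List.sum_cons, ih]; ring

-- ===== VERDICT (by name: the statement is the Claim_ definition above) =====
theorem gt_spec : Claim_equal_gt := by
  intro A B _
  unfold Spec_gt gt gt_alt
  simp only [gt_outer, gt_alt_fold]
  have : (A.map (fun a =>
      ((PySem.List.bisectLeft (PySem.List.sorted B (fun x => x) false) a : Int))
        - (((PySem.List.sorted B (fun x => x) false).length : Int)
            - (PySem.List.bisectRight (PySem.List.sorted B (fun x => x) false) a : Int)))).sum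
      = (A.map (fun a => (B.countP (fun b => decide (b < a)) : Int))).sum
        - (A.map (fun a => (B.countP (fun b => decide (a < b)) : Int))).sum := by
    rw [← sum_map_sub]
    congr 1
    apply List.map_congr_left
    intro a _
    rw [bisectLeft_eq_countP, bisectRight_eq_countP]
  rw [this]
  simp only [zero_add, decide_eq_decide]
  omega
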